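-- pv_equiv track=rewrite | github.com/perlinm/anl | circuit_cutting/fragment_simulator.py | identify_init_exit_wires
-- ===== SOURCE A (Python) =====
-- def identify_init_exit_wires(wire_path_map, num_fragments):
--     # collect all exit/init wires in format ( frag_index, wire )
--     all_init_wires = set()
--     all_exit_wires = set()
--
--     # loop over all paths to identify init/exit wires
--     for path in wire_path_map.values():
--         all_init_wires.update(path[1:])
--         all_exit_wires.update(path[:-1])
--
--     # collect init/exit wires within each fragment, sorting them to fix their order
--     init_wires = tuple([ { wire for idx, wire in all_init_wires if idx == frag_idx }
--                          for frag_idx in range(num_fragments) ])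
--     exit_wires = tuple([ { wire for idx, wire in all_exit_wires if idx == frag_idx }
--                          for frag_idx in range(num_fragments) ])
--     return init_wires, exit_wires
-- ===== SOURCE B (Python) =====
-- def identify_init_exit_wires(wire_path_map, num_fragments):
--     # single pass: bucket each wire directly into its fragment's set
--     init_wires = [set() for _ in range(num_fragments)]
--     exit_wires = [set() for _ in range(num_fragments)]
--     for path in wire_path_map.values():
--         for idx, wire in path[1:]:
--             if 0 <= idx < num_fragments:
--                 init_wires[idx].add(wire)
--         for idx, wire in path[:-1]:
--             if 0 <= idx < num_fragments:
--                 exit_wires[idx].add(wire)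
--     return tuple(init_wires), tuple(exit_wires)
-- ===== Notes on version B (the rewrite author's own statement) =====
-- stated objective: alternative
-- what changed: Replaces the global init/exit pair-sets plus a per-fragment rescan of those sets by a single pass that buckets each wire directly into its fragment's set.
import Mathlib
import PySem

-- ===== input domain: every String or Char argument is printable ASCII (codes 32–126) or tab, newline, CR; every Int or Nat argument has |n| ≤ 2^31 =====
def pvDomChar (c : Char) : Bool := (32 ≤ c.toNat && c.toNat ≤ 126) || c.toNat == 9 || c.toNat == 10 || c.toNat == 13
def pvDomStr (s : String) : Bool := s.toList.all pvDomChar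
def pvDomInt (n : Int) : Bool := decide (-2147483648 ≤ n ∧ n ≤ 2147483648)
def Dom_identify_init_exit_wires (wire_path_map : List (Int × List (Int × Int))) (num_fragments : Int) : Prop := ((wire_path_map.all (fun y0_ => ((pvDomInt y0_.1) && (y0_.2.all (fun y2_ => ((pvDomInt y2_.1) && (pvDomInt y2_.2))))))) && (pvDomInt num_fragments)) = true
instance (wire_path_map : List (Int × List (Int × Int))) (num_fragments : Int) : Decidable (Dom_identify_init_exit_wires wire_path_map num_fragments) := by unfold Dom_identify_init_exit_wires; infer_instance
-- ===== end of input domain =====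

-- B replaces A's global pair-sets plus one rescan per fragment by a single pass bucketing
-- each wire into its fragment's set (objective: alternative). Python sets become PySem.Set
-- (first-occurrence order); the per-fragment results are sets, so set order carries no meaning.

-- ===== PORT A =====
def identify_init_exit_wires (wire_path_map : List (Int × List (Int × Int))) (num_fragments : Int) : List (List Int) × List (List Int) :=
  -- all_init_wires / all_exit_wires accumulated over wire_path_map.values()
  let allWires := wire_path_map.foldl
    (fun (st : PySem.Set (Int × Int) × PySem.Set (Int × Int)) kv =>
      (PySem.Set.update st.1 (PySem.List.slice kv.2 (some 1) none),
       PySem.Set.update st.2 (PySem.List.slice kv.2 none (some (-1)))))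
    (PySem.Set.empty, PySem.Set.empty)
  -- { wire for idx, wire in all_*_wires if idx == frag_idx } for frag_idx in range(num_fragments)
  let init_wires := (PySem.List.pyRange 0 num_fragments 1).map
    (fun frag_idx => PySem.Set.ofList ((allWires.1.filter (fun p => p.1 == frag_idx)).map (·.2)))
  let exit_wires := (PySem.List.pyRange 0 num_fragments 1).map
    (fun frag_idx => PySem.Set.ofList ((allWires.2.filter (fun p => p.1 == frag_idx)).map (·.2)))
  (init_wires, exit_wires)

-- ===== PORT B =====
-- buckets[idx].add(wire), guarded by 0 <= idx < num_fragments
def pvBucketAdd (num_fragments : Int) (bs : List (List Int)) (p : Int × Int) : List (List Int) :=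
  if 0 ≤ p.1 ∧ p.1 < num_fragments then
    PySem.List.pySetD bs p.1 (PySem.Set.add (PySem.List.pyGetD bs p.1 []) p.2)
  else bs

def identify_init_exit_wires_alt (wire_path_map : List (Int × List (Int × Int))) (num_fragments : Int) : List (List Int) × List (List Int) :=
  -- init_wires = [set() for _ in range(num_fragments)], same for exit_wires
  let init0 := (PySem.List.pyRange 0 num_fragments 1).map (fun _ => ([] : List Int))
  let exit0 := (PySem.List.pyRange 0 num_fragments 1).map (fun _ => ([] : List Int))
  wire_path_map.foldl
    (fun (st : List (List Int) × List (List Int)) kv =>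
      ((PySem.List.slice kv.2 (some 1) none).foldl (pvBucketAdd num_fragments) st.1,
       (PySem.List.slice kv.2 none (some (-1))).foldl (pvBucketAdd num_fragments) st.2))
    (init0, exit0)

-- ===== PRECONDITION & SPEC =====
def Spec_identify_init_exit_wires (wire_path_map : List (Int × List (Int × Int))) (num_fragments : Int) (out : List (List Int) × List (List Int)) : Prop := out = identify_init_exit_wires_alt wire_path_map num_fragments
instance (wire_path_map : List (Int × List (Int × Int))) (num_fragments : Int) (out : List (List Int) × List (List Int)) : Decidable (Spec_identify_init_exit_wires wire_path_map num_fragments out) := by unfold Spec_identify_init_exit_wires; infer_instance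

-- ===== CLAIM (what is proved, stated in full; the proofs are below) =====
def Claim_equal_identify_init_exit_wires : Prop := ∀ (wire_path_map : List (Int × List (Int × Int))) (num_fragments : Int), Dom_identify_init_exit_wires wire_path_map num_fragments → Spec_identify_init_exit_wires wire_path_map num_fragments (identify_init_exit_wires wire_path_map num_fragments)

-- ===== LEMMAS AND PROOFS =====

-- filter commutes with first-occurrence dedup (accumulator form)
theorem pv_filter_foldl_add (L : List (Int × Int)) (q : Int × Int → Bool) :
    ∀ acc : List (Int × Int),
      (L.foldl PySem.Set.add acc).filter q = (L.filter q).foldl PySem.Set.add (acc.filter q) := by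
  induction L with
  | nil => intro acc; simp
  | cons a L ih =>
    intro acc
    have hstep : (PySem.Set.add acc a).filter q
        = if q a then PySem.Set.add (acc.filter q) a else acc.filter q := by
      by_cases hmem : a ∈ acc <;> by_cases hq : q a <;>
        simp [PySem.Set.add, hmem, hq, List.filter_append, List.mem_filter]
    simp only [List.foldl_cons, List.filter_cons]
    by_cases hq : q a
    · simp only [hq, ite_true, List.foldl_cons]
      rw [ih (PySem.Set.add acc a), hstep]
      simp [hq]
    · simp only [hq, Bool.false_eq_true, ite_false]
      rw [ih (PySem.Set.add acc a), hstep]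
      simp [hq]

-- mapping snd commutes with dedup when all first components coincide (accumulator form)
theorem pv_map_snd_foldl_add (P : List (Int × Int)) (f : Int) :
    ∀ acc : List (Int × Int), (∀ p ∈ P, p.1 = f) → (∀ p ∈ acc, p.1 = f) →
      (P.foldl PySem.Set.add acc).map (·.2) = (P.map (·.2)).foldl PySem.Set.add (acc.map (·.2)) := by
  induction P with
  | nil => intro acc _ _; simp
  | cons a P ih =>
    intro acc hP hacc
    have ha : a.1 = f := hP a (List.mem_cons_self)
    have hmemiff : a ∈ acc ↔ a.2 ∈ acc.map (·.2) := by
      constructor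
      · intro h; exact List.mem_map.mpr ⟨a, h, rfl⟩
      · intro h
        rcases List.mem_map.mp h with ⟨b, hb, hb2⟩
        have : b = a := Prod.ext ((hacc b hb).trans ha.symm) hb2
        exact this ▸ hb
    have hstep : (PySem.Set.add acc a).map (·.2) = PySem.Set.add (acc.map (·.2)) a.2 := by
      by_cases hmem : a ∈ acc
      · simp [PySem.Set.add, hmem, hmemiff.mp hmem]
      · have : a.2 ∉ acc.map (·.2) := fun h => hmem (hmemiff.mpr h)
        simp [PySem.Set.add, hmem, this]
    simp only [List.foldl_cons, List.map_cons]
    rw [ih (PySem.Set.add acc a) (fun p hp => hP p (List.mem_cons_of_mem _ hp)), hstep]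
    intro p hp
    by_cases hmem : a ∈ acc
    · exact hacc p (by simpa [PySem.Set.add, hmem] using hp)
    · have : p ∈ acc ++ [a] := by simpa [PySem.Set.add, hmem] using hp
      rcases List.mem_append.mp this with h | h
      · exact hacc p h
      · simpa [List.mem_singleton.mp h] using ha

-- the bucket fold preserves the number of buckets
theorem pv_bucket_length (n : Int) (L : List (Int × Int)) :
    ∀ bs : List (List Int), (L.foldl (pvBucketAdd n) bs).length = bs.length := by
  induction L with
  | nil => intro bs; rfl
  | cons p L ih =>
    intro bs
    rw [List.foldl_cons, ih]
    unfold pvBucketAdd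
    split_ifs with h
    · exact PySem.List.length_pySetD bs p.1 _
    · rfl

-- bucket k of the fold collects exactly the wires whose fragment index is k
theorem pv_bucket_get (n : Int) (L : List (Int × Int)) :
    ∀ (bs : List (List Int)), bs.length = n.toNat → ∀ (k : Nat), k < bs.length →
      (L.foldl (pvBucketAdd n) bs)[k]?
        = some (((L.filter (fun p => p.1 == (k : Int))).map (·.2)).foldl PySem.Set.add (bs.getD k [])) := by
  induction L with
  | nil =>
    intro bs _ k hk
    simp [List.getD_eq_getElem?_getD, List.getElem?_eq_getElem hk]
  | cons p L ih =>
    intro bs hbs k hk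
    have hkn : (k : Int) < n := by
      have : k < n.toNat := hbs ▸ hk
      omega
    rw [List.foldl_cons, List.filter_cons]
    by_cases hg : 0 ≤ p.1 ∧ p.1 < n
    · -- in-range pair: bucket p.1.toNat gains p.2
      have hmn : p.1.toNat < bs.length := by omega
      have hset : pvBucketAdd n bs p = bs.set p.1.toNat (PySem.Set.add (bs.getD p.1.toNat []) p.2) := by
        unfold pvBucketAdd
        rw [if_pos hg, PySem.List.pySetD_of_nonneg _ _ hg.1, PySem.List.pyGetD_of_nonneg _ _ hg.1]
      have hlen' : (pvBucketAdd n bs p).length = bs.length := by rw [hset]; simp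
      by_cases hpk : p.1 = (k : Int)
      · have hnk : p.1.toNat = k := by omega
        have hq : (p.1 == (k : Int)) = true := by simp [hpk]
        rw [hq]
        simp only [ite_true, List.map_cons, List.foldl_cons]
        rw [ih (pvBucketAdd n bs p) (by rw [hlen']; exact hbs) k (by rw [hlen']; exact hk)]
        congr 2
        rw [hset, hnk]
        simp [List.getD_eq_getElem?_getD, hk]
      · have hq : (p.1 == (k : Int)) = false := by simp [hpk]
        rw [hq]
        simp only [Bool.false_eq_true, ite_false]
        rw [ih (pvBucketAdd n bs p) (by rw [hlen']; exact hbs) k (by rw [hlen']; exact hk)]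
        congr 2
        rw [hset]
        have hne : p.1.toNat ≠ k := by omega
        simp [List.getD_eq_getElem?_getD, hne]
    · -- out-of-range pair: nothing changes, and it cannot match any k < n
      have hq : (p.1 == (k : Int)) = false := by
        simp only [beq_eq_false_iff_ne, ne_eq]
        intro hpk; apply hg; constructor <;> omega
      rw [hq]
      simp only [Bool.false_eq_true, ite_false]
      have hskip : pvBucketAdd n bs p = bs := by unfold pvBucketAdd; rw [if_neg hg]
      rw [hskip]
      exact ih bs hbs k hk

-- per-fragment agreement: A's "dedup globally, then filter by fragment" equals B's bucket
theorem pv_component (n : Int) (L : List (Int × Int)) :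
    L.foldl (pvBucketAdd n) ((PySem.List.pyRange 0 n 1).map (fun _ => ([] : List Int)))
      = (PySem.List.pyRange 0 n 1).map
          (fun f => PySem.Set.ofList (((PySem.Set.ofList L).filter (fun p => p.1 == f)).map (·.2))) := by
  have hlen0 : ((PySem.List.pyRange 0 n 1).map (fun _ => ([] : List Int))).length = n.toNat := by
    simp [PySem.List.length_pyRange_one]
  apply List.ext_getElem?
  intro k
  by_cases hk : k < n.toNat
  · rw [pv_bucket_get n L _ hlen0 k (by omega)]
    rw [List.getElem?_map, PySem.List.getElem?_pyRange_one]
    have hkif : (if k < (n - 0).toNat then some ((0 : Int) + (k : Nat)) else none) = some ((k : Nat) : Int) := by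
      rw [if_pos (by omega), zero_add]
    rw [hkif]
    have hb0 : ((PySem.List.pyRange 0 n 1).map (fun _ => ([] : List Int))).getD k [] = [] := by
      simp [List.getD_eq_getElem?_getD, hk]
    rw [hb0]
    have hA : ∀ p ∈ L.filter (fun p => p.1 == (k : Int)), p.1 = (k : Int) := by
      intro p hp
      simpa using (List.mem_filter.mp hp).2
    have e1 : (PySem.Set.ofList L).filter (fun p => p.1 == (k : Int))
        = PySem.Set.ofList (L.filter (fun p => p.1 == (k : Int))) := by
      have := pv_filter_foldl_add L (fun p => p.1 == (k : Int)) []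
      simpa [PySem.Set.ofList_eq_foldl] using this
    have e2 : (PySem.Set.ofList (L.filter (fun p => p.1 == (k : Int)))).map (·.2)
        = PySem.Set.ofList ((L.filter (fun p => p.1 == (k : Int))).map (·.2)) := by
      have := pv_map_snd_foldl_add (L.filter (fun p => p.1 == (k : Int))) (k : Int) [] hA (by simp)
      simpa [PySem.Set.ofList_eq_foldl] using this
    have e3 : PySem.Set.ofList (PySem.Set.ofList ((L.filter (fun p => p.1 == (k : Int))).map (·.2)))
        = PySem.Set.ofList ((L.filter (fun p => p.1 == (k : Int))).map (·.2)) :=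
      PySem.Set.ofList_eq_self_of_nodup _ (PySem.Set.nodup_ofList _)
    simp only [Option.map_some]
    rw [e1, e2, e3, PySem.Set.ofList_eq_foldl]
  · have h1 : (L.foldl (pvBucketAdd n) ((PySem.List.pyRange 0 n 1).map (fun _ => ([] : List Int)))).length ≤ k := by
      rw [pv_bucket_length, hlen0]; omega
    have h2 : (((PySem.List.pyRange 0 n 1)).map
        (fun f => PySem.Set.ofList (((PySem.Set.ofList L).filter (fun p => p.1 == f)).map (·.2)))).length ≤ k := by
      simp [PySem.List.length_pyRange_one]; omega
    rw [List.getElem?_eq_none h1, List.getElem?_eq_none h2]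

-- one side (init or exit): A's map-over-fragments equals B's bucket fold
theorem pv_side (n : Int) (wpm : List (Int × List (Int × Int)))
    (tl : List (Int × Int) → List (Int × Int)) :
    (PySem.List.pyRange 0 n 1).map
        (fun f => PySem.Set.ofList
          (((wpm.foldl (fun s kv => PySem.Set.update s (tl kv.2)) PySem.Set.empty).filter
              (fun p => p.1 == f)).map (·.2)))
      = wpm.foldl (fun bs kv => (tl kv.2).foldl (pvBucketAdd n) bs)
          ((PySem.List.pyRange 0 n 1).map (fun _ => ([] : List Int))) := by
  have h1 : wpm.foldl (fun s kv => PySem.Set.update s (tl kv.2)) PySem.Set.empty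
      = PySem.Set.ofList (wpm.flatMap (fun kv => tl kv.2)) := by
    rw [PySem.Set.ofList_eq_foldl, List.foldl_flatMap]
    rfl
  have h2 : wpm.foldl (fun bs kv => (tl kv.2).foldl (pvBucketAdd n) bs)
        ((PySem.List.pyRange 0 n 1).map (fun _ => ([] : List Int)))
      = (wpm.flatMap (fun kv => tl kv.2)).foldl (pvBucketAdd n)
          ((PySem.List.pyRange 0 n 1).map (fun _ => ([] : List Int))) := by
    rw [List.foldl_flatMap]
  rw [h1, h2, pv_component]

-- ===== VERDICT (by name: the statement is the Claim_ definition above) =====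
theorem identify_init_exit_wires_spec : Claim_equal_identify_init_exit_wires := by
  intro wpm n _
  unfold Spec_identify_init_exit_wires identify_init_exit_wires identify_init_exit_wires_alt
  have hA := PySem.List.foldl_prod_mk
      (fun (s : PySem.Set (Int × Int)) (kv : Int × List (Int × Int)) =>
        PySem.Set.update s (PySem.List.slice kv.2 (some 1) none))
      (fun (s : PySem.Set (Int × Int)) (kv : Int × List (Int × Int)) =>
        PySem.Set.update s (PySem.List.slice kv.2 none (some (-1))))
      wpm PySem.Set.empty PySem.Set.empty
  have hB := PySem.List.foldl_prod_mk
      (fun (bs : List (List Int)) (kv : Int × List (Int × Int)) =>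
        (PySem.List.slice kv.2 (some 1) none).foldl (pvBucketAdd n) bs)
      (fun (bs : List (List Int)) (kv : Int × List (Int × Int)) =>
        (PySem.List.slice kv.2 none (some (-1))).foldl (pvBucketAdd n) bs)
      wpm ((PySem.List.pyRange 0 n 1).map (fun _ => ([] : List Int)))
      ((PySem.List.pyRange 0 n 1).map (fun _ => ([] : List Int)))
  beta_reduce at hA hB
  rw [hA, hB]
  dsimp only
  simp only [Prod.mk.injEq]
  exact ⟨pv_side n wpm (fun l => PySem.List.slice l (some 1) none),
         pv_side n wpm (fun l => PySem.List.slice l none (some (-1)))⟩
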